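-- pv_equiv track=rewrite | github.com/ckoons/BubbleSpacetimeTheory | play/toy_316_width_preservation.py | bcp
-- ===== SOURCE A (Python) =====
-- def bcp(clauses, assign):
--     """BCP returning (result, final_assignment).
--     result: 'conflict' or 'no_conflict'
--     """
--     assign = dict(assign)
--     changed = True
--     while changed:
--         changed = False
--         for clause in clauses:
--             unsat_count = 0
--             sat = False
--             last_unset = None
--             for lit in clause:
--                 var = abs(lit)
--                 if var in assign:
--                     val = assign[var]
--                     if (lit > 0 and val == 1) or (lit < 0 and val == 0):
--                         sat = True
--                         break
--                     else:
--                         unsat_count += 1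
--                 else:
--                     last_unset = lit
--             if sat:
--                 continue
--             if unsat_count == len(clause):
--                 return 'conflict', assign
--             if unsat_count == len(clause) - 1 and last_unset is not None:
--                 var = abs(last_unset)
--                 val = 1 if last_unset > 0 else 0
--                 if var in assign:
--                     if assign[var] != val:
--                         return 'conflict', assign
--                 else:
--                     assign[var] = val
--                     changed = True
--     return 'no_conflict', assign
-- ===== SOURCE B (Python) =====
-- def bcp(clauses, assign):
--     """BCP returning (result, final_assignment).
--     result: 'conflict' or 'no_conflict'
--     Worklist version: a variable -> clause-index map is built once and only
--     clauses touched by a new assignment are re-examined (dirty flags), instead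
--     of rescanning every clause on every pass.
--     """
--     assign = dict(assign)
--     occurs = {}
--     for i, clause in enumerate(clauses):
--         for lit in clause:
--             occurs.setdefault(abs(lit), []).append(i)
--     dirty = [True] * len(clauses)
--     pending = True
--     while pending:
--         pending = False
--         for i, clause in enumerate(clauses):
--             if not dirty[i]:
--                 continue
--             dirty[i] = False
--             if any((l > 0 and assign.get(abs(l)) == 1)
--                    or (l < 0 and assign.get(abs(l)) == 0) for l in clause):
--                 continue
--             unassigned = [l for l in clause if abs(l) not in assign]
--             if not unassigned:
--                 return 'conflict', assign
--             if len(unassigned) == 1: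
--                 lit = unassigned[0]
--                 assign[abs(lit)] = 1 if lit > 0 else 0
--                 for j in occurs.get(abs(lit), []):
--                     dirty[j] = True
--                 pending = True
--     return 'no_conflict', assign
-- ===== Notes on version B (the rewrite author's own statement) =====
-- stated objective: alternative
-- what changed: B builds a variable-to-clause-index map once and keeps per-clause dirty flags, so after the first pass only clauses containing a freshly assigned variable are re-examined (and clause evaluation is an any()-generator plus a comprehension instead of A's counting break-loop), where A rescans every clause with a full inner scan on every round of the while-changed loop.
import Mathlib
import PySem

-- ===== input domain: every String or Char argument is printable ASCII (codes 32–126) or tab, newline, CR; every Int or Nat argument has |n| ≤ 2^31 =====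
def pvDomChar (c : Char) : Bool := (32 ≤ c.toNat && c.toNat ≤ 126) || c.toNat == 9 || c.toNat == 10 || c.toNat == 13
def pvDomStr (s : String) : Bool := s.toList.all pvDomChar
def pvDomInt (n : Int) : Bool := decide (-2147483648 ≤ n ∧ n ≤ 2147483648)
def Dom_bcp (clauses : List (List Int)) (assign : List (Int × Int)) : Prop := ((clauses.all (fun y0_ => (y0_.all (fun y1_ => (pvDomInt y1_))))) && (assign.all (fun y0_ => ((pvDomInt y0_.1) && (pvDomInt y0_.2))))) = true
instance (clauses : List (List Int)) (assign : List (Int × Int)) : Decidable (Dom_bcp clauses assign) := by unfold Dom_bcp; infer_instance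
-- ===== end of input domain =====

-- B replaces A's repeated full scans over all clauses by a variable→clause-index map plus
-- dirty flags, so only clauses touched by a new assignment are re-examined (objective: alternative).

-- ===== PORT A =====

-- A's inner `for lit in clause` loop: state (unsat_count, sat-break flag, last_unset)
def scanA (a : PySem.Dict Int Int) : List Int → Int → Option Int → Int × Bool × Option Int
  | [], cnt, last => (cnt, false, last)
  | lit :: rest, cnt, last =>
    match a.get? |lit| with
    | some val =>
      if (lit > 0 ∧ val = 1) ∨ (lit < 0 ∧ val = 0) then (cnt, true, last)
      else scanA a rest (cnt + 1) last
    | none => scanA a rest cnt (some lit)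

-- one `for clause in clauses` pass of A; `.inr a` is the `return 'conflict', assign`
def passA : List (List Int) → PySem.Dict Int Int → Bool → (Bool × PySem.Dict Int Int) ⊕ PySem.Dict Int Int
  | [], a, ch => .inl (ch, a)
  | c :: cs, a, ch =>
    let t := scanA a c 0 none
    if t.2.1 then passA cs a ch
    else if t.1 = (c.length : Int) then .inr a
    else if t.1 = (c.length : Int) - 1 then
      match t.2.2 with
      | some l =>
        match a.get? |l| with
        | some v => if v ≠ (if l > 0 then (1:Int) else 0) then .inr a else passA cs a ch
        | none => passA cs (a.insert |l| (if l > 0 then 1 else 0)) true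
      | none => passA cs a ch
    else passA cs a ch

-- ===== PORT B (helpers; the pass) =====

-- B's generator expression `(l > 0 and assign.get(abs(l)) == 1) or (l < 0 and assign.get(abs(l)) == 0)`
def litSat (a : PySem.Dict Int Int) (l : Int) : Bool :=
  (decide (l > 0) && (a.get? |l| == some 1)) || (decide (l < 0) && (a.get? |l| == some 0))

-- B's `any(... for l in clause)`
def satB (a : PySem.Dict Int Int) (c : List Int) : Bool := c.any (litSat a)

-- B's comprehension `[l for l in clause if abs(l) not in assign]`
def unasB (a : PySem.Dict Int Int) (c : List Int) : List Int :=
  c.filter (fun l => !(a.contains |l|))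

-- B's occurrence index: `occurs.setdefault(abs(lit), []).append(i)` over `enumerate(clauses)`
def buildOccurs : List (List Int) → Nat → PySem.Dict Int (List Nat) → PySem.Dict Int (List Nat)
  | [], _, d => d
  | c :: cs, i, d => buildOccurs cs (i + 1) (c.foldl (fun d l => d.modify |l| [] (· ++ [i])) d)

-- one pass of B over `enumerate(clauses)`, skipping clean clauses
def passB (occurs : PySem.Dict Int (List Nat)) :
    List (List Int) → Nat → PySem.Dict Int Int → List Bool → Bool →
    (Bool × List Bool × PySem.Dict Int Int) ⊕ PySem.Dict Int Int
  | [], _, a, dirty, pending => .inl (pending, dirty, a)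
  | c :: cs, i, a, dirty, pending =>
    if dirty.getD i false = false then passB occurs cs (i + 1) a dirty pending
    else
      let dirty1 := dirty.set i false
      if satB a c then passB occurs cs (i + 1) a dirty1 pending
      else
        match unasB a c with
        | [] => .inr a
        | l :: rest =>
          if rest.isEmpty then
            passB occurs cs (i + 1) (a.insert |l| (if l > 0 then 1 else 0))
              ((occurs.getD |l| []).foldl (fun d j => d.set j true) dirty1) true
          else passB occurs cs (i + 1) a dirty1 pending

-- ===== termination infrastructure, shared by the two outer loops (cited by decreasing_by) =====

-- measure: number of clause variables still unassigned
def pvMu (clauses : List (List Int)) (a : PySem.Dict Int Int) : Nat :=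
  ((clauses.flatten.map (fun l => |l|)).toFinset.filter (fun v => a.get? v = none)).card

theorem litSat_some {a : PySem.Dict Int Int} {l v : Int} (hg : a.get? |l| = some v) :
    litSat a l = decide ((l > 0 ∧ v = 1) ∨ (l < 0 ∧ v = 0)) := by
  by_cases h1 : l > 0 <;> by_cases h2 : v = 1 <;> by_cases h3 : l < 0 <;> by_cases h4 : v = 0 <;>
    simp [litSat, hg, h1, h2, h3, h4]

theorem litSat_none {a : PySem.Dict Int Int} {l : Int} (hg : a.get? |l| = none) :
    litSat a l = false := by
  simp [litSat, hg]

theorem scanA_flag (a : PySem.Dict Int Int) : ∀ (c : List Int) (cnt : Int) (last : Option Int),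
    (scanA a c cnt last).2.1 = satB a c := by
  intro c
  induction c with
  | nil => intro cnt last; simp [scanA, satB]
  | cons lit rest ih =>
    intro cnt last
    cases hg : a.get? |lit| with
    | none =>
      simp [scanA, hg, satB, List.any_cons, litSat_none hg, ih]
    | some val =>
      by_cases hcond : (lit > 0 ∧ val = 1) ∨ (lit < 0 ∧ val = 0)
      · simp [scanA, hg, hcond, satB, List.any_cons, litSat_some hg]
      · simp [scanA, hg, hcond, satB, List.any_cons, litSat_some hg, ih]

theorem scanA_not_sat (a : PySem.Dict Int Int) : ∀ (c : List Int), satB a c = false →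
    ∀ (cnt : Int) (last : Option Int),
    scanA a c cnt last = (cnt + ((c.length : Int) - ((unasB a c).length : Int)), false, ((unasB a c).getLast?).or last) := by
  intro c
  induction c with
  | nil => intro _ cnt last; simp [scanA, unasB]
  | cons lit rest ih =>
    intro hs cnt last
    have hs' : litSat a lit = false ∧ satB a rest = false := by
      have : (litSat a lit || satB a rest) = false := by
        simpa [satB, List.any_cons] using hs
      exact Bool.or_eq_false_iff.mp this
    cases hg : a.get? |lit| with
    | some val =>
      have hcond : ¬((lit > 0 ∧ val = 1) ∨ (lit < 0 ∧ val = 0)) := by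
        have h1 := hs'.1
        rw [litSat_some hg] at h1
        simpa using h1
      have hcont : a.contains |lit| = true := by
        rw [PySem.Dict.contains_eq_isSome_get?, hg]; rfl
      have hu : unasB a (lit :: rest) = unasB a rest := by
        simp [unasB, hcont]
      rw [scanA, hg]
      simp only [hcond, if_false]
      rw [ih hs'.2 (cnt + 1) last, hu]
      have harith : cnt + 1 + ((rest.length : Int) - ((unasB a rest).length : Int))
          = cnt + (((lit :: rest).length : Int) - ((unasB a rest).length : Int)) := by
        simp only [List.length_cons]; push_cast; ring
      rw [harith]
    | none =>
      have hcont : a.contains |lit| = false := (PySem.Dict.get?_eq_none_iff_contains _ _).mp hg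
      have hu : unasB a (lit :: rest) = lit :: unasB a rest := by
        simp [unasB, hcont]
      rw [scanA, hg, ih hs'.2 cnt (some lit), hu]
      have hlast : ((lit :: unasB a rest).getLast?).or last = ((unasB a rest).getLast?).or (some lit) := by
        rw [List.getLast?_cons]
        cases h2 : (unasB a rest).getLast? <;> simp
      have harith : cnt + ((rest.length : Int) - ((unasB a rest).length : Int))
          = cnt + (((lit :: rest).length : Int) - ((lit :: unasB a rest).length : Int)) := by
        simp only [List.length_cons]; push_cast; ring
      rw [hlast, harith]

theorem mem_unasB {a : PySem.Dict Int Int} {c : List Int} {l : Int} (h : l ∈ unasB a c) :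
    l ∈ c ∧ a.get? |l| = none := by
  rw [unasB, List.mem_filter] at h
  refine ⟨h.1, (PySem.Dict.get?_eq_none_iff_contains _ _).mpr ?_⟩
  simpa using h.2

theorem pvMu_lt {clauses : List (List Int)} {a a' : PySem.Dict Int Int} {v : Int}
    (hmono : ∀ k, a'.get? k = none → a.get? k = none)
    (hv : v ∈ clauses.flatten.map (fun l => |l|)) (hn : a.get? v = none) (hn' : a'.get? v ≠ none) :
    pvMu clauses a' < pvMu clauses a := by
  have hsub : ((clauses.flatten.map (fun l => |l|)).toFinset.filter (fun v => a'.get? v = none)) ⊆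
      ((clauses.flatten.map (fun l => |l|)).toFinset.filter (fun v => a.get? v = none)) := by
    intro x hx
    rw [Finset.mem_filter] at hx ⊢
    exact ⟨hx.1, hmono x hx.2⟩
  apply Finset.card_lt_card
  rw [Finset.ssubset_iff_of_subset hsub]
  refine ⟨v, ?_, ?_⟩
  · rw [Finset.mem_filter]
    exact ⟨List.mem_toFinset.mpr hv, hn⟩
  · rw [Finset.mem_filter]
    rintro ⟨-, hx⟩
    exact hn' hx

theorem passA_keys : ∀ (cs : List (List Int)) (a : PySem.Dict Int Int) (ch ch' : Bool)
    (a' : PySem.Dict Int Int), passA cs a ch = .inl (ch', a') →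
    (∀ k, a'.get? k = none → a.get? k = none) ∧
    (ch' = true → ch = true ∨ ∃ v ∈ cs.flatten.map (fun l => |l|), a.get? v = none ∧ a'.get? v ≠ none) := by
  intro cs
  induction cs with
  | nil =>
    intro a ch ch' a' h
    simp only [passA, Sum.inl.injEq, Prod.mk.injEq] at h
    obtain ⟨h1, h2⟩ := h
    subst h1; subst h2
    exact ⟨fun _ hk => hk, fun hc => Or.inl hc⟩
  | cons c cs ih =>
    intro a ch ch' a' h
    have hext : ∀ v, v ∈ cs.flatten.map (fun l => |l|) → v ∈ (c :: cs).flatten.map (fun l => |l|) := by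
      intro v hv
      simp only [List.flatten_cons, List.map_append, List.mem_append]
      exact Or.inr hv
    by_cases hsat : satB a c = true
    · have hflag : (scanA a c 0 none).2.1 = true := by rw [scanA_flag]; exact hsat
      simp only [passA] at h
      rw [if_pos hflag] at h
      obtain ⟨hm, hch⟩ := ih a ch ch' a' h
      refine ⟨hm, fun hc => ?_⟩
      rcases hch hc with h1 | ⟨v, hv, h1, h2⟩
      · exact Or.inl h1
      · exact Or.inr ⟨v, hext v hv, h1, h2⟩
    · have hsat' : satB a c = false := by revert hsat; cases satB a c <;> simp
      have ht := scanA_not_sat a c hsat' 0 none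
      simp only [passA] at h
      rw [ht] at h
      simp only [] at h
      rw [if_neg (by simp)] at h
      cases hu : unasB a c with
      | nil =>
        rw [hu] at h
        simp at h
      | cons l rest =>
        have hlmem : l ∈ unasB a c := by rw [hu]; exact List.mem_cons_self
        obtain ⟨hlc, hlnone⟩ := mem_unasB hlmem
        have habs : |l| ∈ (c :: cs).flatten.map (fun l => |l|) :=
          List.mem_map_of_mem (by rw [List.flatten_cons]; exact List.mem_append_left _ hlc)
        cases rest with
        | nil =>
          rw [hu] at h
          rw [if_neg (by simp), if_pos (by simp)] at h
          simp only [List.getLast?_cons, List.getLast?_nil, Option.getD_none, Option.some_or] at h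
          rw [hlnone] at h
          obtain ⟨hm, -⟩ := ih (a.insert |l| (if l > 0 then 1 else 0)) true ch' a' h
          have hmono : ∀ k, a'.get? k = none → a.get? k = none := by
            intro k hk
            have h2 := hm k hk
            rw [PySem.Dict.get?_insert] at h2
            by_cases hkl : k = |l|
            · rw [if_pos hkl] at h2; exact absurd h2 (by simp)
            · rwa [if_neg hkl] at h2
          refine ⟨hmono, fun _ => Or.inr ⟨(|l| : Int), habs, hlnone, fun hn' => ?_⟩⟩
          have := hm |l| hn'
          rw [PySem.Dict.get?_insert_self] at this
          exact absurd this (by simp)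
        | cons r rest' =>
          rw [hu] at h
          rw [if_neg (by simp; omega), if_neg (by simp; omega)] at h
          obtain ⟨hm, hch⟩ := ih a ch ch' a' h
          refine ⟨hm, fun hc => ?_⟩
          rcases hch hc with h1 | ⟨v, hv, h1, h2⟩
          · exact Or.inl h1
          · exact Or.inr ⟨v, hext v hv, h1, h2⟩

theorem passA_progress (clauses : List (List Int)) (a a' : PySem.Dict Int Int)
    (h : passA clauses a false = .inl (true, a')) : pvMu clauses a' < pvMu clauses a := by
  obtain ⟨hm, hch⟩ := passA_keys clauses a false true a' h
  rcases hch rfl with h1 | ⟨v, hv, h1, h2⟩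
  · exact absurd h1 (by simp)
  · exact pvMu_lt hm hv h1 h2

theorem passB_keys : ∀ (occurs : PySem.Dict Int (List Nat)) (cs : List (List Int)) (i : Nat)
    (a : PySem.Dict Int Int) (dirty : List Bool) (p p' : Bool) (d' : List Bool)
    (a' : PySem.Dict Int Int), passB occurs cs i a dirty p = .inl (p', d', a') →
    (∀ k, a'.get? k = none → a.get? k = none) ∧
    (p' = true → p = true ∨ ∃ v ∈ cs.flatten.map (fun l => |l|), a.get? v = none ∧ a'.get? v ≠ none) := by
  intro occurs cs
  induction cs with
  | nil =>
    intro i a dirty p p' d' a' h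
    simp only [passB, Sum.inl.injEq, Prod.mk.injEq] at h
    obtain ⟨h1, -, h2⟩ := h
    subst h1; subst h2
    exact ⟨fun _ hk => hk, fun hc => Or.inl hc⟩
  | cons c cs ih =>
    intro i a dirty p p' d' a' h
    have hext : ∀ v, v ∈ cs.flatten.map (fun l => |l|) → v ∈ (c :: cs).flatten.map (fun l => |l|) := by
      intro v hv
      simp only [List.flatten_cons, List.map_append, List.mem_append]
      exact Or.inr hv
    have step : ∀ (a0 : PySem.Dict Int Int) (d0 : List Bool) (p0 : Bool),
        passB occurs cs (i + 1) a0 d0 p0 = .inl (p', d', a') → a0 = a → p0 = p →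
        (∀ k, a'.get? k = none → a.get? k = none) ∧
        (p' = true → p = true ∨ ∃ v ∈ (c :: cs).flatten.map (fun l => |l|), a.get? v = none ∧ a'.get? v ≠ none) := by
      intro a0 d0 p0 hrec ha hp
      subst ha; subst hp
      obtain ⟨hm, hch⟩ := ih (i + 1) a0 d0 p0 p' d' a' hrec
      refine ⟨hm, fun hc => ?_⟩
      rcases hch hc with h1 | ⟨v, hv, h1, h2⟩
      · exact Or.inl h1
      · exact Or.inr ⟨v, hext v hv, h1, h2⟩
    simp only [passB] at h
    by_cases hd : dirty.getD i false = false
    · rw [if_pos hd] at h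
      exact step a dirty p h rfl rfl
    · rw [if_neg hd] at h
      by_cases hsat : satB a c = true
      · rw [if_pos hsat] at h
        exact step a _ p h rfl rfl
      · rw [if_neg hsat] at h
        cases hu : unasB a c with
        | nil => rw [hu] at h; exact absurd h (by simp)
        | cons l rest =>
          have hlmem : l ∈ unasB a c := by rw [hu]; exact List.mem_cons_self
          obtain ⟨hlc, hlnone⟩ := mem_unasB hlmem
          have habs : |l| ∈ (c :: cs).flatten.map (fun l => |l|) :=
            List.mem_map_of_mem (by rw [List.flatten_cons]; exact List.mem_append_left _ hlc)
          rw [hu] at h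
          cases rest with
          | nil =>
            simp only [List.isEmpty_nil, if_true] at h
            obtain ⟨hm, -⟩ := ih (i + 1) _ _ true p' d' a' h
            have hmono : ∀ k, a'.get? k = none → a.get? k = none := by
              intro k hk
              have h2 := hm k hk
              rw [PySem.Dict.get?_insert] at h2
              by_cases hkl : k = |l|
              · rw [if_pos hkl] at h2; exact absurd h2 (by simp)
              · rwa [if_neg hkl] at h2
            refine ⟨hmono, fun _ => Or.inr ⟨(|l| : Int), habs, hlnone, fun hn' => ?_⟩⟩
            have := hm |l| hn'
            rw [PySem.Dict.get?_insert_self] at this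
            exact absurd this (by simp)
          | cons r rest' =>
            simp only [List.isEmpty_cons, Bool.false_eq_true, if_false] at h
            exact step a _ p h rfl rfl

theorem passB_progress (clauses : List (List Int)) (occurs : PySem.Dict Int (List Nat))
    (a a' : PySem.Dict Int Int) (dirty d' : List Bool)
    (h : passB occurs clauses 0 a dirty false = .inl (true, d', a')) :
    pvMu clauses a' < pvMu clauses a := by
  obtain ⟨hm, hch⟩ := passB_keys occurs clauses 0 a dirty false true d' a' h
  rcases hch rfl with h1 | ⟨v, hv, h1, h2⟩
  · exact absurd h1 (by simp)
  · exact pvMu_lt hm hv h1 h2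

-- ===== PORT A (outer loop) =====

-- A's `while changed` loop
def loopA (clauses : List (List Int)) (a : PySem.Dict Int Int) : String × PySem.Dict Int Int :=
  match h : passA clauses a false with
  | .inr a' => ("conflict", a')
  | .inl (true, a') => loopA clauses a'
  | .inl (false, a') => ("no_conflict", a')
termination_by pvMu clauses a
decreasing_by exact passA_progress clauses a a' h

def bcp (clauses : List (List Int)) (assign : List (Int × Int)) : String × (List (Int × Int)) :=
  let r := loopA clauses (PySem.Dict.ofList assign)
  (r.1, r.2.items)

-- ===== PORT B (outer loop) =====

-- B's `while pending` loop
def loopB (clauses : List (List Int)) (occurs : PySem.Dict Int (List Nat))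
    (a : PySem.Dict Int Int) (dirty : List Bool) : String × PySem.Dict Int Int :=
  match h : passB occurs clauses 0 a dirty false with
  | .inr a' => ("conflict", a')
  | .inl (true, d', a') => loopB clauses occurs a' d'
  | .inl (false, _, a') => ("no_conflict", a')
termination_by pvMu clauses a
decreasing_by exact passB_progress clauses occurs a a' dirty d' h

def bcp_alt (clauses : List (List Int)) (assign : List (Int × Int)) : String × (List (Int × Int)) :=
  let occurs := buildOccurs clauses 0 PySem.Dict.empty
  let r := loopB clauses occurs (PySem.Dict.ofList assign) (List.replicate clauses.length true)
  (r.1, r.2.items)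

-- ===== PRECONDITION & SPEC =====
def Spec_bcp (clauses : List (List Int)) (assign : List (Int × Int)) (out : String × (List (Int × Int))) : Prop := out = bcp_alt clauses assign
instance (clauses : List (List Int)) (assign : List (Int × Int)) (out : String × (List (Int × Int))) : Decidable (Spec_bcp clauses assign out) := by unfold Spec_bcp; infer_instance

-- ===== CLAIM (what is proved, stated in full; the proofs are below) =====
def Claim_equal_bcp : Prop := ∀ (clauses : List (List Int)) (assign : List (Int × Int)), Dom_bcp clauses assign → Spec_bcp clauses assign (bcp clauses assign)

-- ===== LEMMAS AND PROOFS =====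

-- a clause is inert when re-examining it can produce no event: satisfied, or ≥ 2 unassigned lits
def pvInert (a : PySem.Dict Int Int) (c : List Int) : Prop :=
  satB a c = true ∨ 2 ≤ (unasB a c).length

-- the dirty-flag invariant: every clean clause is inert under the current assignment
def pvInv (clauses : List (List Int)) (a : PySem.Dict Int Int) (dirty : List Bool) : Prop :=
  ∀ i c, clauses[i]? = some c → dirty.getD i false = false → pvInert a c

theorem getD_set_bool (d : List Bool) (i j : Nat) (x : Bool) :
    (d.set j x).getD i false = if j = i ∧ j < d.length then x else d.getD i false := by
  rw [List.getD_eq_getElem?_getD, List.getD_eq_getElem?_getD, List.getElem?_set]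
  by_cases h1 : j = i
  · subst h1
    by_cases h2 : j < d.length
    · simp [h2]
    · rw [List.getElem?_eq_none (by omega : d.length ≤ j)]
      simp [h2]
  · simp [h1]

theorem foldl_set_length (js : List Nat) (d : List Bool) :
    (js.foldl (fun d j => d.set j true) d).length = d.length := by
  induction js generalizing d with
  | nil => rfl
  | cons j js ih => simp [List.foldl_cons, ih, List.length_set]

theorem foldl_set_getD (js : List Nat) (d : List Bool) (i : Nat) :
    (js.foldl (fun d j => d.set j true) d).getD i false =
      if i ∈ js ∧ i < d.length then true else d.getD i false := by
  induction js generalizing d with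
  | nil => simp
  | cons j js ih =>
    rw [List.foldl_cons, ih, List.length_set, getD_set_bool]
    by_cases hji : j = i <;> by_cases hlt : i < d.length <;> by_cases hm : i ∈ js <;>
      simp [hji, hlt, hm, List.mem_cons] <;> tauto

theorem satB_insert {a : PySem.Dict Int Int} {v w : Int} :
    ∀ (c : List Int), (∀ l ∈ c, |l| ≠ v) → satB (a.insert v w) c = satB a c := by
  intro c
  induction c with
  | nil => intro _; rfl
  | cons x xs ih =>
    intro hv
    simp only [satB, List.any_cons]
    have hx : litSat (a.insert v w) x = litSat a x := by
      unfold litSat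
      rw [PySem.Dict.get?_insert, if_neg (hv x List.mem_cons_self)]
    have hxs := ih (fun l hl => hv l (List.mem_cons_of_mem x hl))
    simp only [satB] at hxs
    rw [hx, hxs]

theorem unasB_insert {a : PySem.Dict Int Int} {c : List Int} {v w : Int}
    (hv : ∀ l ∈ c, |l| ≠ v) : unasB (a.insert v w) c = unasB a c := by
  unfold unasB
  apply List.filter_congr
  intro l hl
  rw [PySem.Dict.contains_insert]
  have : (|l| == v) = false := by simp [hv l hl]
  rw [this, Bool.false_or]

-- proof-only description of the occurrence lists built by buildOccurs
def occList : List (List Int) → Nat → Int → List Nat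
  | [], _, _ => []
  | c :: cs, i, v => (c.filter (fun l => |l| = v)).map (fun _ => i) ++ occList cs (i + 1) v

theorem buildOccurs_getD : ∀ (cs : List (List Int)) (i : Nat) (d : PySem.Dict Int (List Nat)) (v : Int),
    (buildOccurs cs i d).getD v [] = d.getD v [] ++ occList cs i v := by
  intro cs
  induction cs with
  | nil => intro i d v; simp [buildOccurs, occList]
  | cons c cs ih =>
    intro i d v
    rw [buildOccurs, ih, occList]
    have hinner : (c.foldl (fun d l => d.modify |l| [] (· ++ [i])) d).getD v []
        = d.getD v [] ++ (c.filter (fun l => |l| = v)).map (fun _ => i) := by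
      have hmap : c.foldl (fun d l => d.modify |l| [] (· ++ [i])) d
          = (c.map (fun l => ((|l| : Int), i))).foldl (fun d p => d.modify p.1 [] (· ++ [p.2])) d := by
        rw [List.foldl_map]
      rw [hmap, PySem.Dict.getD_foldl_modify_append]
      congr 1
      rw [List.filter_map, List.map_map]
      rfl
    rw [hinner, List.append_assoc]

theorem mem_occList_of : ∀ (cs : List (List Int)) (i k : Nat) (c : List Int) (l : Int),
    cs[k]? = some c → l ∈ c → (i + k) ∈ occList cs i |l| := by
  intro cs
  induction cs with
  | nil => intro i k c l h; simp at h
  | cons c0 cs ih =>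
    intro i k c l hc hl
    cases k with
    | zero =>
      simp only [List.getElem?_cons_zero, Option.some.injEq] at hc
      rw [occList, Nat.add_zero]
      have hmem : l ∈ c0.filter (fun l' => decide (|l'| = |l|)) :=
        List.mem_filter.mpr ⟨by rw [hc]; exact hl, by simp⟩
      exact List.mem_append_left _ (List.mem_map_of_mem hmem)
    | succ k =>
      rw [List.getElem?_cons_succ] at hc
      rw [occList]
      apply List.mem_append_right
      have := ih (i + 1) k c l hc hl
      have heq : i + (k + 1) = (i + 1) + k := by omega
      rwa [heq]

-- clause k of `clauses` is in |l|'s occurrence list whenever it contains l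
theorem mem_occurs_of {clauses : List (List Int)} {k : Nat} {c : List Int} {l : Int}
    (hc : clauses[k]? = some c) (hl : l ∈ c) :
    k ∈ (buildOccurs clauses 0 PySem.Dict.empty).getD |l| [] := by
  rw [buildOccurs_getD, PySem.Dict.getD_empty, List.nil_append]
  have := mem_occList_of clauses 0 k c l hc hl
  rwa [Nat.zero_add] at this

def PassRel (clauses : List (List Int))
    (rA : (Bool × PySem.Dict Int Int) ⊕ PySem.Dict Int Int)
    (rB : (Bool × List Bool × PySem.Dict Int Int) ⊕ PySem.Dict Int Int) : Prop :=
  match rA, rB with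
  | .inr x, .inr y => x = y
  | .inl (c1, a1), .inl (c2, d2, a2) =>
      c1 = c2 ∧ a1 = a2 ∧ d2.length = clauses.length ∧ pvInv clauses a1 d2
  | _, _ => False

theorem pass_corr (clauses : List (List Int)) :
    ∀ (cs : List (List Int)) (k : Nat) (a : PySem.Dict Int Int) (dirty : List Bool) (ch : Bool),
    clauses.drop k = cs → dirty.length = clauses.length → pvInv clauses a dirty →
    PassRel clauses (passA cs a ch)
      (passB (buildOccurs clauses 0 PySem.Dict.empty) cs k a dirty ch) := by
  intro cs
  induction cs with
  | nil =>
    intro k a dirty ch _ hlen hinv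
    simp only [passA, passB]
    exact ⟨rfl, rfl, hlen, hinv⟩
  | cons c cs ih =>
    intro k a dirty ch hdrop hlen hinv
    have hc : clauses[k]? = some c := by
      have h0 : (clauses.drop k)[0]? = clauses[k + 0]? := List.getElem?_drop
      rw [hdrop] at h0
      simpa using h0.symm
    obtain ⟨hklt, -⟩ := List.getElem?_eq_some_iff.mp hc
    have hdrop' : clauses.drop (k + 1) = cs := by
      have h1 : (clauses.drop k).drop 1 = clauses.drop (k + 1) := by
        rw [List.drop_drop]
      rw [← h1, hdrop, List.drop_one, List.tail_cons]
    simp only [passA, passB]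
    by_cases hd : dirty.getD k false = false
    · rw [if_pos hd]
      have hine := hinv k c hc hd
      by_cases hsat : satB a c = true
      · have hflag : (scanA a c 0 none).2.1 = true := by rw [scanA_flag]; exact hsat
        rw [if_pos hflag]
        exact ih (k + 1) a dirty ch hdrop' hlen hinv
      · have h2 : 2 ≤ (unasB a c).length := by
          rcases hine with h1 | h2
          · exact absurd h1 hsat
          · exact h2
        have hsat' : satB a c = false := by revert hsat; cases satB a c <;> simp
        have ht := scanA_not_sat a c hsat' 0 none
        rw [ht]
        rw [if_neg (by simp), if_neg (by omega), if_neg (by omega)]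
        exact ih (k + 1) a dirty ch hdrop' hlen hinv
    · rw [if_neg hd]
      have hdlen : (dirty.set k false).length = clauses.length := by
        rw [List.length_set]; exact hlen
      by_cases hsat : satB a c = true
      · have hflag : (scanA a c 0 none).2.1 = true := by rw [scanA_flag]; exact hsat
        rw [if_pos hflag, if_pos hsat]
        apply ih (k + 1) a (dirty.set k false) ch hdrop' hdlen
        intro i ci hci hdi
        rw [getD_set_bool] at hdi
        by_cases hki : k = i ∧ k < dirty.length
        · obtain ⟨hk1, -⟩ := hki
          subst hk1
          rw [hc] at hci
          injection hci with hci
          subst hci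
          exact Or.inl hsat
        · rw [if_neg hki] at hdi
          exact hinv i ci hci hdi
      · have hsat' : satB a c = false := by revert hsat; cases satB a c <;> simp
        have ht := scanA_not_sat a c hsat' 0 none
        rw [ht, if_neg hsat]
        rw [if_neg (by simp)]
        cases hu : unasB a c with
        | nil =>
          rw [if_pos (by simp)]
          rfl
        | cons l rest =>
          have hlmem : l ∈ unasB a c := by rw [hu]; exact List.mem_cons_self
          obtain ⟨hlc, hlnone⟩ := mem_unasB hlmem
          cases rest with
          | nil =>
            rw [if_neg (by simp), if_pos (by simp)]
            simp only [List.getLast?_cons, List.getLast?_nil, Option.getD_none, Option.some_or,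
              List.isEmpty_nil]
            rw [hlnone]
            rw [if_pos trivial]
            have hdlen2 : (((buildOccurs clauses 0 PySem.Dict.empty).getD |l| []).foldl
                (fun d j => d.set j true) (dirty.set k false)).length = clauses.length := by
              rw [foldl_set_length, List.length_set]; exact hlen
            apply ih (k + 1) _ _ true hdrop' hdlen2
            intro i ci hci hdi
            obtain ⟨hilt, -⟩ := List.getElem?_eq_some_iff.mp hci
            rw [foldl_set_getD] at hdi
            have hiD1 : i < (dirty.set k false).length := by
              rw [List.length_set, hlen]; exact hilt
            have hnotin : i ∉ (buildOccurs clauses 0 PySem.Dict.empty).getD |l| [] := by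
              intro hin
              rw [if_pos ⟨hin, hiD1⟩] at hdi
              exact absurd hdi (by simp)
            have hno : ∀ l' ∈ ci, |l'| ≠ |l| := by
              intro l' hl' heq
              exact hnotin (heq ▸ mem_occurs_of hci hl')
            rw [if_neg (fun hh => hnotin hh.1)] at hdi
            rw [getD_set_bool] at hdi
            by_cases hki : k = i ∧ k < dirty.length
            · exfalso
              obtain ⟨hk1, -⟩ := hki
              subst hk1
              rw [hc] at hci
              injection hci with hci
              subst hci
              exact hno l hlc rfl
            · rw [if_neg hki] at hdi
              rcases hinv i ci hci hdi with hs | hge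
              · exact Or.inl (by rw [satB_insert ci hno]; exact hs)
              · exact Or.inr (by rw [unasB_insert hno]; exact hge)
          | cons r rest' =>
            rw [if_neg (by simp; omega), if_neg (by simp; omega)]
            simp only [List.isEmpty_cons]
            rw [if_neg (by simp)]
            apply ih (k + 1) a (dirty.set k false) ch hdrop' hdlen
            intro i ci hci hdi
            rw [getD_set_bool] at hdi
            by_cases hki : k = i ∧ k < dirty.length
            · obtain ⟨hk1, -⟩ := hki
              subst hk1
              rw [hc] at hci
              injection hci with hci
              subst hci
              refine Or.inr ?_
              rw [hu]
              simp
            · rw [if_neg hki] at hdi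
              exact hinv i ci hci hdi

theorem loop_corr (clauses : List (List Int)) :
    ∀ (n : Nat) (a : PySem.Dict Int Int) (dirty : List Bool), pvMu clauses a ≤ n →
    dirty.length = clauses.length → pvInv clauses a dirty →
    loopA clauses a = loopB clauses (buildOccurs clauses 0 PySem.Dict.empty) a dirty := by
  intro n
  induction n using Nat.strong_induction_on with
  | _ n ihn =>
  intro a dirty hmu hlen hinv
  have hrel := pass_corr clauses clauses 0 a dirty false (by simp) hlen hinv
  rw [loopA, loopB]
  cases hA : passA clauses a false with
  | inr x =>
    cases hB : passB (buildOccurs clauses 0 PySem.Dict.empty) clauses 0 a dirty false with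
    | inr y =>
      rw [hA, hB] at hrel
      simp only [PassRel] at hrel
      simp [hrel]
    | inl q =>
      rw [hA, hB] at hrel
      obtain ⟨q1, q2, q3⟩ := q
      simp only [PassRel] at hrel
  | inl p =>
    obtain ⟨ch1, a1⟩ := p
    cases hB : passB (buildOccurs clauses 0 PySem.Dict.empty) clauses 0 a dirty false with
    | inr y =>
      rw [hA, hB] at hrel
      simp only [PassRel] at hrel
    | inl q =>
      obtain ⟨ch2, d2, a2⟩ := q
      rw [hA, hB] at hrel
      simp only [PassRel] at hrel
      obtain ⟨hch, ha, hlen2, hinv2⟩ := hrel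
      subst hch
      subst ha
      cases ch1 with
      | false => simp
      | true =>
        simp only []
        have hmu' : pvMu clauses a1 < pvMu clauses a := passA_progress clauses a a1 hA
        exact ihn (pvMu clauses a1) (lt_of_lt_of_le hmu' hmu) a1 d2 le_rfl hlen2 hinv2

-- ===== VERDICT (by name: the statement is the Claim_ definition above) =====
theorem bcp_spec : Claim_equal_bcp := by
  intro clauses assign _
  show bcp clauses assign = bcp_alt clauses assign
  have hinv : pvInv clauses (PySem.Dict.ofList assign) (List.replicate clauses.length true) := by
    intro i c hc hd
    exfalso
    obtain ⟨hi, -⟩ := List.getElem?_eq_some_iff.mp hc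
    simp [List.getD_eq_getElem?_getD, hi] at hd
  have h := loop_corr clauses (pvMu clauses (PySem.Dict.ofList assign))
    (PySem.Dict.ofList assign) (List.replicate clauses.length true) le_rfl (by simp) hinv
  simp only [bcp, bcp_alt, h]
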